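-- pv_equiv track=rewrite | github.com/cs0317/stagehand | auto_verbs/verbs/refactor2.py | clean_empty_finally
-- ===== SOURCE A (Python) =====
-- def clean_empty_finally(content):
--     """Remove finally: blocks that have no indented body."""
--     lines = content.split('\n')
--     result = []
--     i = 0
--     while i < len(lines):
--         stripped = lines[i].strip()
--         if stripped == 'finally:':
--             indent = len(lines[i]) - len(lines[i].lstrip())
--             # Check if next non-blank line is at the same or less indent
--             j = i + 1
--             has_body = False
--             while j < len(lines):
--                 if lines[j].strip() == '':
--                     j += 1
--                     continue
--                 next_indent = len(lines[j]) - len(lines[j].lstrip())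
--                 if next_indent > indent:
--                     has_body = True
--                 break
--             if not has_body:
--                 i += 1  # skip the finally: line
--                 continue
--         result.append(lines[i])
--         i += 1
--     return '\n'.join(result)
-- ===== SOURCE B (Python) =====
-- def clean_empty_finally(content):
--     """Remove finally: blocks that have no indented body."""
--     lines = content.split('\n')
--     n = len(lines)
--     # backward pass: next_indent[i] = indent of nearest non-blank line strictly after i, else None
--     next_indent = [None] * n
--     last = None
--     for i in range(n - 1, -1, -1):
--         next_indent[i] = last
--         if lines[i].strip() != '':
--             last = len(lines[i]) - len(lines[i].lstrip())
--     out = []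
--     for i in range(n):
--         line = lines[i]
--         if line.strip() == 'finally:':
--             ind = len(line) - len(line.lstrip())
--             ni = next_indent[i]
--             if ni is None or ni <= ind:
--                 continue
--         out.append(line)
--     return '\n'.join(out)
-- ===== Notes on version B (the rewrite author's own statement) =====
-- stated objective: alternative
-- what changed: Replaced A's while-loop, which re-scans forward past blank lines after each candidate finally line, by a single backward pass precomputing each line's next non-blank indentation followed by a flat filter pass.
import Mathlib
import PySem

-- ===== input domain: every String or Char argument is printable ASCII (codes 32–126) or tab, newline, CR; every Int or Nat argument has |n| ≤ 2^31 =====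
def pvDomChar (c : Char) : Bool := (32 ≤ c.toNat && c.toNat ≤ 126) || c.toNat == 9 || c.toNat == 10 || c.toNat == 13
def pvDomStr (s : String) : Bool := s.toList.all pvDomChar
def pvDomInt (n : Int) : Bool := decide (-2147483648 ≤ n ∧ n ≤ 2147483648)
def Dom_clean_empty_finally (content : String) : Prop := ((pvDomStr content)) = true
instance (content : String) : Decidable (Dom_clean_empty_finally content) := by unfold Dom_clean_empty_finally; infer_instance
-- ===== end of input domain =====

-- B replaces A's per-'finally:' forward lookahead by a backward next-non-blank-indent pass plus a flat filter (alternative decomposition, same result).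

-- ===== PORT A =====
-- indentation of a line: len(line) - len(line.lstrip())
def pvIndent (l : String) : Int := PySem.Str.len l - PySem.Str.len (PySem.Str.lstrip l)

-- A's inner while loop from j onward: skip blanks, then has_body = next_indent > indent
def pvHasBody (indent : Int) : List String → Bool
  | [] => false
  | l :: rest =>
    if PySem.Str.strip l = "" then pvHasBody indent rest
    else decide (indent < pvIndent l)

-- A's outer while loop over the remaining lines
def pvGoA : List String → List String
  | [] => []
  | l :: rest =>
    if PySem.Str.strip l = "finally:" then
      if pvHasBody (pvIndent l) rest then l :: pvGoA rest else pvGoA rest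
    else l :: pvGoA rest

def clean_empty_finally (content : String) : String :=
  PySem.Str.join "\n" (pvGoA ((PySem.Str.split? content "\n").getD []))

-- ===== PORT B =====
-- backward pass: annotate each line with the indent of the nearest non-blank line strictly after it
def pvAnnot (lines : List String) : Option Int × List (String × Option Int) :=
  lines.foldr
    (fun l acc =>
      let last' := if PySem.Str.strip l = "" then acc.1 else some (pvIndent l)
      (last', (l, acc.1) :: acc.2))
    (none, [])

-- forward pass: drop a 'finally:' line whose next non-blank indent is missing or not greater
def pvKeep (p : String × Option Int) : Bool :=
  if PySem.Str.strip p.1 = "finally:" then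
    match p.2 with
    | none => false
    | some ni => decide (pvIndent p.1 < ni)
  else true

def clean_empty_finally_alt (content : String) : String :=
  PySem.Str.join "\n" ((((pvAnnot ((PySem.Str.split? content "\n").getD [])).2).filter pvKeep).map Prod.fst)

-- ===== PRECONDITION & SPEC =====
def Spec_clean_empty_finally (content : String) (out : String) : Prop := out = clean_empty_finally_alt content
instance (content : String) (out : String) : Decidable (Spec_clean_empty_finally content out) := by unfold Spec_clean_empty_finally; infer_instance

-- ===== CLAIM (what is proved, stated in full; the proofs are below) =====
def Claim_equal_clean_empty_finally : Prop := ∀ (content : String), Dom_clean_empty_finally content → Spec_clean_empty_finally content (clean_empty_finally content)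

-- ===== LEMMAS AND PROOFS =====

-- B's running 'last' after processing a suffix = indent of its first non-blank line
theorem pvAnnot_fst (lines : List String) :
    (pvAnnot lines).1 = (match lines with
      | [] => none
      | l :: rest => if PySem.Str.strip l = "" then (pvAnnot rest).1 else some (pvIndent l)) := by
  cases lines with
  | nil => rfl
  | cons l rest => simp [pvAnnot]

theorem pvAnnot_snd (l : String) (rest : List String) :
    (pvAnnot (l :: rest)).2 = (l, (pvAnnot rest).1) :: (pvAnnot rest).2 := by
  simp [pvAnnot]

-- A's lookahead equals the test on the precomputed next non-blank indent
theorem pvHasBody_eq (indent : Int) (ls : List String) :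
    pvHasBody indent ls = (match (pvAnnot ls).1 with
      | none => false
      | some k => decide (indent < k)) := by
  induction ls with
  | nil => rfl
  | cons l rest ih =>
    rw [pvAnnot_fst]
    by_cases h : PySem.Str.strip l = ""
    · simp [pvHasBody, h, ih]
    · simp [pvHasBody, h]

theorem pvGoA_eq (lines : List String) :
    pvGoA lines = ((pvAnnot lines).2.filter pvKeep).map Prod.fst := by
  induction lines with
  | nil => rfl
  | cons l rest ih =>
    rw [pvAnnot_snd]
    by_cases h : PySem.Str.strip l = "finally:"
    · rw [pvGoA, if_pos h, pvHasBody_eq]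
      cases hk : (pvAnnot rest).1 with
      | none => simp [List.filter, pvKeep, h, ih]
      | some k =>
        by_cases hlt : pvIndent l < k
        · simp [List.filter, pvKeep, h, hlt, ih]
        · simp [List.filter, pvKeep, h, hlt, ih]
    · rw [pvGoA, if_neg h]
      simp [List.filter, pvKeep, h, ih]

-- ===== VERDICT (by name: the statement is the Claim_ definition above) =====
theorem clean_empty_finally_spec : Claim_equal_clean_empty_finally := by
  intro content _
  unfold Spec_clean_empty_finally clean_empty_finally clean_empty_finally_alt
  rw [pvGoA_eq]
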